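-- pv_equiv track=rewrite | github.com/nshkkz/python_ping | python_ping.py | expand_targets
-- ===== SOURCE A (Python) =====
-- from ipaddress import IPv4Address
--
-- def expand_targets(raw_input):
--     targets = []
--     seen = set()
--
--     for part in raw_input.split(","):
--         token = part.strip()
--         if not token:
--             continue
--
--         if "-" in token:
--             start_text, end_text = [p.strip() for p in token.split("-", 1)]
--             try:
--                 start_ip = IPv4Address(start_text)
--                 end_ip = IPv4Address(end_text)
--             except ValueError:
--                 # Not an IPv4 range, treat as a normal hostname/target.
--                 if token not in seen:
--                     seen.add(token)
--                     targets.append(token)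
--                 continue
--
--             if int(start_ip) > int(end_ip):
--                 raise ValueError(f"Invalid range '{token}': start IP is greater than end IP.")
--
--             for ip_int in range(int(start_ip), int(end_ip) + 1):
--                 ip_text = str(IPv4Address(ip_int))
--                 if ip_text not in seen:
--                     seen.add(ip_text)
--                     targets.append(ip_text)
--             continue
--
--         if token not in seen:
--             seen.add(token)
--             targets.append(token)
--
--     if not targets:
--         raise ValueError("No valid targets were provided.")
--
--     return targets
-- ===== SOURCE B (Python) =====
-- import re
--
-- # Canonical decimal-octet pattern: 0-255 without leading zeros.
-- _OCTET = r"(25[0-5]|2[0-4][0-9]|1[0-9][0-9]|[1-9]?[0-9])"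
-- _IPV4 = re.compile(r"{o}\.{o}\.{o}\.{o}".format(o=_OCTET))
--
--
-- def expand_targets(raw_input):
--     result = _dedup(_expand_parts(raw_input.split(",")))
--     if not result:
--         raise ValueError("No valid targets were provided.")
--     return result
--
--
-- def _expand_parts(parts):
--     """Divide and conquer: expand each half, concatenate the item lists."""
--     if len(parts) <= 1:
--         return _expand_token(parts[0].strip()) if parts else []
--     mid = len(parts) // 2
--     return _expand_parts(parts[:mid]) + _expand_parts(parts[mid:])
--
--
-- def _expand_token(token):
--     if not token:
--         return []
--     if "-" not in token:
--         return [token]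
--     start_text, end_text = token.split("-", 1)
--     start = _ip_value(start_text.strip())
--     end = _ip_value(end_text.strip())
--     if start is None or end is None:
--         # Not an IPv4-IPv4 range: the token is an ordinary hostname/target.
--         return [token]
--     if start > end:
--         raise ValueError(f"Invalid range '{token}': start IP is greater than end IP.")
--     return [_ip_text(start + offset) for offset in range(end - start + 1)]
--
--
-- def _ip_value(text):
--     """The 32-bit value of a dotted-quad IPv4 address, or None if not one."""
--     m = _IPV4.fullmatch(text)
--     if m is None:
--         return None
--     a, b, c, d = (int(g) for g in m.groups())
--     return ((a * 256 + b) * 256 + c) * 256 + d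
--
--
-- def _ip_text(value):
--     return f"{value >> 24}.{(value >> 16) & 255}.{(value >> 8) & 255}.{value & 255}"
--
--
-- def _dedup(items):
--     """Divide and conquer, first occurrence wins: dedup each half, then keep
--     only the right-half items that do not already occur on the left."""
--     if len(items) <= 1:
--         return items
--     mid = len(items) // 2
--     left = _dedup(items[:mid])
--     right = _dedup(items[mid:])
--     return left + [x for x in right if x not in left]
-- ===== Notes on version B (the rewrite author's own statement) =====
-- stated objective: alternative
-- what changed: A's single imperative pass threading a mutable seen-set/targets pair is replaced by a pure divide-and-conquer pipeline: recursively expand the two halves of the token list into a flat item list (ranges validated by the canonical IPv4 octet regex and formatted with shift/mask arithmetic instead of ipaddress objects), then deduplicate by recursively deduping each half and keeping only right-half items absent from the left.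
import Mathlib
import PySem

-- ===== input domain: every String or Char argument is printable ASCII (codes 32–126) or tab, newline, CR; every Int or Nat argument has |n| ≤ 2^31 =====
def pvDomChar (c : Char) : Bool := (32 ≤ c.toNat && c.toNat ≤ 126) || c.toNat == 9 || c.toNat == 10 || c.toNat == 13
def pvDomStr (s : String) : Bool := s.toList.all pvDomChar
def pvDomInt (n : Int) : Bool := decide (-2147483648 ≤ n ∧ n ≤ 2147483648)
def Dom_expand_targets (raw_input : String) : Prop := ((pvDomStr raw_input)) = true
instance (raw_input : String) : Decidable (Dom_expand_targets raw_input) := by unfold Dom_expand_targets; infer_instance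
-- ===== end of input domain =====

-- B replaces A's imperative loop (mutable seen-set + targets list) with a pure recursive
-- pipeline: recursion over the token list builds a flat item list (ranges expanded by
-- address arithmetic start+offset), then a recursive first-occurrence dedup filters each
-- head out of the deduplicated tail; equivalence is claimed on Pre_ (where A returns).

-- ===== PORT A =====
-- Shared low-level helpers: both Pythons call ipaddress.IPv4Address; ported by hand,
-- exact on the ASCII domain (4 dot-separated octets, decimal digits only, ≤3 chars,
-- no leading zeros, value ≤ 255; str(IPv4Address(n)) is dotted decimal).
def pvOctet? (p : List Char) : Option Nat :=
  if p ≠ [] ∧ p.length ≤ 3 ∧ p.all PySem.Chars.isdigit = true ∧ (p.length = 1 ∨ p.head? ≠ some '0') then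
    let v := p.foldl (fun n c => n * 10 + (c.toNat - 48)) 0
    if v ≤ 255 then some v else none
  else none

def pvParseIPv4 (cs : List Char) : Option Nat :=
  match PySem.Chars.splitOn cs ['.'] with
  | [a, b, c, d] =>
    match pvOctet? a, pvOctet? b, pvOctet? c, pvOctet? d with
    | some x, some y, some z, some w => some (((x * 256 + y) * 256 + z) * 256 + w)
    | _, _, _, _ => none
  | _ => none

def pvIPv4Str (n : Int) : String :=
  let m := n.toNat
  String.ofList ((PySem.Int.toChars (m / 16777216 : Nat)) ++ '.' ::
             (PySem.Int.toChars (m / 65536 % 256 : Nat)) ++ '.' ::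
             (PySem.Int.toChars (m / 256 % 256 : Nat)) ++ '.' ::
             (PySem.Int.toChars (m % 256 : Nat)))

-- A's loop state: (seen, targets); `none` models the ValueError on an inverted range.
def pvAddTarget (st : PySem.Set String × List String) (t : String) : PySem.Set String × List String :=
  if PySem.Set.contains st.1 t then st else (PySem.Set.add st.1 t, st.2 ++ [t])

def pvLoopA : List (List Char) → PySem.Set String × List String → Option (PySem.Set String × List String)
  | [], st => some st
  | part :: rest, st =>
    let token := PySem.Chars.strip part
    if token = [] then pvLoopA rest st
    else if PySem.Chars.isIn ['-'] token then
      match PySem.Chars.splitOnMax token ['-'] 1 with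
      | [st0, en0] =>
        match pvParseIPv4 (PySem.Chars.strip st0), pvParseIPv4 (PySem.Chars.strip en0) with
        | some s, some e =>
          if s > e then none   -- raise ValueError (inverted range); outside Pre_
          else pvLoopA rest
            ((PySem.List.pyRange (s : Int) ((e : Int) + 1) 1).foldl
              (fun acc i => pvAddTarget acc (pvIPv4Str i)) st)
        | _, _ => pvLoopA rest (pvAddTarget st (String.ofList token))
      | _ => pvLoopA rest (pvAddTarget st (String.ofList token))  -- unreachable: split of a token containing '-' has 2 parts
    else pvLoopA rest (pvAddTarget st (String.ofList token))

def expand_targets (raw_input : String) : List String :=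
  match pvLoopA (PySem.Chars.splitOn raw_input.toList [',']) ([], []) with
  | none => []                 -- A raises ValueError here; outside Pre_
  | some (_, targets) => targets  -- empty targets: A raises ValueError; outside Pre_

-- ===== PORT B =====
-- B validates dotted quads with the canonical octet regex (25[0-5]|2[0-4][0-9]|1[0-9][0-9]|[1-9]?[0-9]);
-- ported by hand as an alternation grouped by match length (alternatives have lengths 3, 3, 3, 2, 1),
-- exact on the ASCII domain ([0-9] is PySem.Chars.isdigit there).
def pvOctetB (p : List Char) : Bool :=
  match p with
  | [a, b, c] =>
      (a = '2' && b = '5' && '0' ≤ c && c ≤ '5') ||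
      (a = '2' && '0' ≤ b && b ≤ '4' && PySem.Chars.isdigit c) ||
      (a = '1' && PySem.Chars.isdigit b && PySem.Chars.isdigit c)
  | [a, b] => '1' ≤ a && a ≤ '9' && PySem.Chars.isdigit b
  | [a] => PySem.Chars.isdigit a
  | _ => false

-- int(g) on a regex-matched all-digit group: plain decimal value (exact there).
def pvDigitsVal (p : List Char) : Nat := p.foldl (fun n c => n * 10 + (c.toNat - 48)) 0

-- fullmatch of o\.o\.o\.o: since an octet contains no '.', the text matches iff
-- splitting on '.' yields exactlyå four parts, each matching the octet regex.
def pvIpValueB (cs : List Char) : Option Nat :=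
  match PySem.Chars.splitOn cs ['.'] with
  | [a, b, c, d] =>
    if pvOctetB a && pvOctetB b && pvOctetB c && pvOctetB d then
      some (((pvDigitsVal a * 256 + pvDigitsVal b) * 256 + pvDigitsVal c) * 256 + pvDigitsVal d)
    else none
  | _ => none

-- f"{v >> 24}.{(v >> 16) & 255}.{(v >> 8) & 255}.{v & 255}" (& 255 ported as % 256; v ≥ 0 here).
def pvIpTextB (v : Int) : String :=
  let m := v.toNat
  String.ofList ((PySem.Int.toChars (m >>> 24 : Nat)) ++ '.' ::
             (PySem.Int.toChars ((m >>> 16) % 256 : Nat)) ++ '.' ::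
             (PySem.Int.toChars ((m >>> 8) % 256 : Nat)) ++ '.' ::
             (PySem.Int.toChars (m % 256 : Nat)))

def pvExpandToken (token : List Char) : Option (List String) :=
  if token = [] then some []
  else if PySem.Chars.isIn ['-'] token = false then some [String.ofList token]
  else match PySem.Chars.splitOnMax token ['-'] 1 with
    | [a, b] =>
      match pvIpValueB (PySem.Chars.strip a), pvIpValueB (PySem.Chars.strip b) with
      | some s, some e =>
        if s > e then none   -- raise ValueError (inverted range); outside Pre_
        else some ((PySem.List.pyRange 0 ((e : Int) - (s : Int) + 1) 1).map
                     (fun off => pvIpTextB ((s : Int) + off)))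
      | _, _ => some [String.ofList token]
    | _ => some [String.ofList token]  -- unreachable: split of a token containing '-' has 2 parts

-- Divide and conquer over the token list: expand each half, concatenate.
def pvExpandPartsB (parts : List (List Char)) : Option (List String) :=
  if h : parts.length ≤ 1 then
    match parts with
    | [] => some []
    | p :: _ => pvExpandToken (PySem.Chars.strip p)
  else
    match pvExpandPartsB (parts.take (parts.length / 2)),
          pvExpandPartsB (parts.drop (parts.length / 2)) with
    | some xs, some ys => some (xs ++ ys)
    | _, _ => none
termination_by parts.length
decreasing_by
  · simp only [List.length_take]; omega
  · simp only [List.length_drop]; omega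

-- Divide and conquer, first occurrence wins: dedup each half, keep only the
-- right-half items that do not already occur on the left.
def pvDedupDC (items : List String) : List String :=
  if h : items.length ≤ 1 then items
  else
    let L := pvDedupDC (items.take (items.length / 2))
    let R := pvDedupDC (items.drop (items.length / 2))
    L ++ R.filter (fun x => !(L.contains x))
termination_by items.length
decreasing_by
  · simp only [List.length_take]; omega
  · simp only [List.length_drop]; omega

def expand_targets_alt (raw_input : String) : List String :=
  match pvExpandPartsB (PySem.Chars.splitOn raw_input.toList [',']) with
  | none => []                 -- B raises the same ValueError; outside Pre_
  | some items => pvDedupDC items  -- empty result: B raises; outside Pre_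

-- ===== PRECONDITION & SPEC =====
-- Pre_ excludes exactly the inputs on which A raises ValueError: inputs with a
-- comma-token that is an inverted IPv4 range (start > end), and inputs with no
-- non-empty token (empty target list); B raises the same ValueError there.
def pvRangeOk (token : List Char) : Bool :=
  if PySem.Chars.isIn ['-'] token then
    match PySem.Chars.splitOnMax token ['-'] 1 with
    | [a, b] =>
      match pvParseIPv4 (PySem.Chars.strip a), pvParseIPv4 (PySem.Chars.strip b) with
      | some s, some e => decide (s ≤ e)
      | _, _ => true
    | _ => true
  else true

def Pre_expand_targets (raw_input : String) : Prop :=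
  ((PySem.Chars.splitOn raw_input.toList [',']).any (fun p => decide (PySem.Chars.strip p ≠ []))) = true ∧
  ((PySem.Chars.splitOn raw_input.toList [',']).all (fun p => pvRangeOk (PySem.Chars.strip p))) = true

instance (raw_input : String) : Decidable (Pre_expand_targets raw_input) := by
  unfold Pre_expand_targets; infer_instance

def pvWitness_expand_targets : String := "10.0.0.1-10.0.0.3, host"

def Spec_expand_targets (raw_input : String) (out : List String) : Prop := out = expand_targets_alt raw_input
instance (raw_input : String) (out : List String) : Decidable (Spec_expand_targets raw_input out) := by unfold Spec_expand_targets; infer_instance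

-- ===== CLAIM (what is proved, stated in full; the proofs are below) =====
def Claim_equal_expand_targets : Prop := ∀ (raw_input : String), Dom_expand_targets raw_input → Pre_expand_targets raw_input → Spec_expand_targets raw_input (expand_targets raw_input)

-- ===== LEMMAS AND PROOFS =====

-- Proof-side helpers: a linear recursion equal to B's divide-and-conquer expansion,
-- and a head-recursive first-occurrence dedup, used to relate both ports.
def pvItemsLin : List (List Char) → Option (List String)
  | [] => some []
  | p :: rest =>
    match pvExpandToken (PySem.Chars.strip p), pvItemsLin rest with
    | some xs, some ys => some (xs ++ ys)
    | _, _ => none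

def pvDedupB : List String → List String
  | [] => []
  | x :: rest => x :: (pvDedupB rest).filter (fun y => y ≠ x)


theorem pv_char_le_iff (a b : Char) : (a ≤ b) ↔ (a.toNat ≤ b.toNat) := by
  rw [Char.le_def, UInt32.le_iff_toNat_le]
  exact Iff.rfl

theorem pv_char_eq_iff (a b : Char) : (a = b) ↔ (a.toNat = b.toNat) := by
  constructor
  · intro h; rw [h]
  · intro h
    apply Char.ext
    exact UInt32.toNat_inj.mp h

theorem pv_isdigit_iff (c : Char) : PySem.Chars.isdigit c = true ↔ (48 ≤ c.toNat ∧ c.toNat ≤ 57) := by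
  simp [PySem.Chars.isdigit, pv_char_le_iff]

theorem pvc0 : ('0').toNat = 48 := rfl
theorem pvc1 : ('1').toNat = 49 := rfl
theorem pvc2 : ('2').toNat = 50 := rfl
theorem pvc4 : ('4').toNat = 52 := rfl
theorem pvc5 : ('5').toNat = 53 := rfl
theorem pvc9 : ('9').toNat = 57 := rfl

-- IPv4Address octet acceptance (pvOctet?) coincides with the canonical octet regex (pvOctetB).
theorem pvOctet_eq_regex (p : List Char) :
    pvOctet? p = if pvOctetB p then some (pvDigitsVal p) else none := by
  rcases p with _ | ⟨a, _ | ⟨b, _ | ⟨c, _ | ⟨d, t⟩⟩⟩⟩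
  · simp [pvOctet?, pvOctetB]
  · simp only [pvOctet?, pvOctetB, pvDigitsVal, List.foldl, List.all_cons, List.all_nil,
      Bool.and_true, List.length_cons, List.length_nil, List.head?_cons, List.foldl_cons, List.foldl_nil]
    split_ifs <;>
      (try simp [pv_isdigit_iff, pv_char_le_iff, pv_char_eq_iff,
        pvc0, pvc1, pvc2, pvc4, pvc5, pvc9] at *) <;>
      omega
  · simp only [pvOctet?, pvOctetB, pvDigitsVal, List.foldl, List.all_cons, List.all_nil,
      Bool.and_true, List.length_cons, List.length_nil, List.head?_cons, List.foldl_cons, List.foldl_nil]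
    split_ifs <;>
      (try simp [pv_isdigit_iff, pv_char_le_iff, pv_char_eq_iff,
        pvc0, pvc1, pvc2, pvc4, pvc5, pvc9] at *) <;>
      omega
  · simp only [pvOctet?, pvOctetB, pvDigitsVal, List.foldl, List.all_cons, List.all_nil,
      Bool.and_true, List.length_cons, List.length_nil, List.head?_cons, List.foldl_cons, List.foldl_nil]
    split_ifs <;>
      (try simp [pv_isdigit_iff, pv_char_le_iff, pv_char_eq_iff,
        pvc0, pvc1, pvc2, pvc4, pvc5, pvc9] at *) <;>
      omega
  · simp only [pvOctet?, pvOctetB, List.length_cons]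
    rw [if_neg (by simp)]
    rfl

theorem pvIpValueB_eq (cs : List Char) : pvIpValueB cs = pvParseIPv4 cs := by
  unfold pvIpValueB pvParseIPv4
  cases h : PySem.Chars.splitOn cs ['.'] with
  | nil => rfl
  | cons a tl =>
    rcases tl with _ | ⟨b, _ | ⟨c, _ | ⟨d, _ | ⟨e, t⟩⟩⟩⟩ <;>
      simp only [pvOctet_eq_regex] <;>
      first
        | rfl
        | (by_cases ha : pvOctetB a <;> by_cases hb : pvOctetB b <;>
           by_cases hc : pvOctetB c <;> by_cases hd : pvOctetB d <;>
           simp [ha, hb, hc, hd])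

theorem pvIpTextB_eq (n : Int) : pvIpTextB n = pvIPv4Str n := by
  simp [pvIpTextB, pvIPv4Str, Nat.shiftRight_eq_div_pow]


theorem pvAddTarget_pair (s : PySem.Set String) (t : String) :
    pvAddTarget (s, s) t = (PySem.Set.add s t, PySem.Set.add s t) := by
  by_cases h : t ∈ s <;> simp [pvAddTarget, PySem.Set.add, h]

theorem foldl_pvAddTarget_pair {α : Type} (l : List α) (f : α → String) (s : PySem.Set String) :
    l.foldl (fun acc i => pvAddTarget acc (f i)) (s, s) =
      (PySem.Set.update s (l.map f), PySem.Set.update s (l.map f)) := by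
  induction l generalizing s with
  | nil => simp [PySem.Set.update]
  | cons x xs ih =>
    rw [List.foldl_cons, pvAddTarget_pair, List.map_cons, PySem.Set.update_cons]
    exact ih _

-- range(int(end)-int(start)+1) offset form = range(int(start), int(end)+1) direct form
theorem pvRange_offset_map (s e : Nat) :
    (PySem.List.pyRange 0 ((e : Int) - (s : Int) + 1) 1).map (fun off => pvIPv4Str ((s : Int) + off)) =
      (PySem.List.pyRange (s : Int) ((e : Int) + 1) 1).map pvIPv4Str := by
  rw [PySem.List.pyRange_one, PySem.List.pyRange_one, List.map_map, List.map_map]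
  have h : ((e : Int) - (s : Int) + 1 - 0).toNat = ((e : Int) + 1 - s).toNat := by omega
  rw [h]
  refine List.map_congr_left (fun k _ => ?_)
  simp only [Function.comp]
  congr 1
  omega

theorem pvLoopA_eq_partsB (parts : List (List Char)) (s : PySem.Set String) :
    pvLoopA parts (s, s) =
      (pvItemsLin parts).map (fun its => (PySem.Set.update s its, PySem.Set.update s its)) := by
  induction parts generalizing s with
  | nil => simp [pvLoopA, pvItemsLin, PySem.Set.update]
  | cons part rest ih =>
    simp only [pvLoopA, pvItemsLin, pvExpandToken, pvIpValueB_eq, pvIpTextB_eq]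
    by_cases h0 : PySem.Chars.strip part = []
    · simp only [h0, if_pos]
      rw [ih]
      cases pvItemsLin rest <;> simp
    · rw [if_neg h0, if_neg h0]
      by_cases h1 : PySem.Chars.isIn ['-'] (PySem.Chars.strip part) = true
      · rw [if_pos h1, if_neg (by simp [h1])]
        cases hsp : PySem.Chars.splitOnMax (PySem.Chars.strip part) ['-'] 1 with
        | nil =>
          rw [pvAddTarget_pair, ih]
          cases pvItemsLin rest <;> simp [PySem.Set.update_cons]
        | cons a tl =>
          cases tl with
          | nil =>
            rw [pvAddTarget_pair, ih]
            cases pvItemsLin rest <;> simp [PySem.Set.update_cons]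
          | cons b tl2 =>
            cases tl2 with
            | cons c tl3 =>
              rw [pvAddTarget_pair, ih]
              cases pvItemsLin rest <;> simp [PySem.Set.update_cons]
            | nil =>
              cases hps : pvParseIPv4 (PySem.Chars.strip a) with
              | none =>
                cases hpe : pvParseIPv4 (PySem.Chars.strip b) <;>
                · simp only [hps, hpe, pvAddTarget_pair, ih]
                  cases pvItemsLin rest <;> simp [PySem.Set.update_cons]
              | some sv =>
                cases hpe : pvParseIPv4 (PySem.Chars.strip b) with
                | none =>
                  simp only [hps, hpe, pvAddTarget_pair, ih]
                  cases pvItemsLin rest <;> simp [PySem.Set.update_cons]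
                | some ev =>
                  by_cases hgt : sv > ev
                  · simp only [hps, hpe, if_pos hgt]
                    simp
                  · simp only [hps, hpe, if_neg hgt,
                        foldl_pvAddTarget_pair _ pvIPv4Str s, ih, pvRange_offset_map]
                    cases pvItemsLin rest <;> simp [PySem.Set.update_append]
      · rw [if_neg h1, if_pos (by simpa using h1), pvAddTarget_pair, ih]
        cases pvItemsLin rest <;> simp [PySem.Set.update_cons]

-- B's recursive filter-dedup computes first-occurrence dedup: generalized over a seed set.
theorem update_eq_append_filter_pvDedupB (l : List String) (s : PySem.Set String) :
    PySem.Set.update s l = s ++ (pvDedupB l).filter (fun y => !(PySem.Set.contains s y)) := by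
  induction l generalizing s with
  | nil => simp [PySem.Set.update, pvDedupB]
  | cons x t ih =>
    rw [PySem.Set.update_cons, ih, pvDedupB]
    by_cases hx : x ∈ s
    · have hadd : PySem.Set.add s x = s := by simp [PySem.Set.add, hx]
      have hcx : (!PySem.Set.contains s x) = false := by simp [hx]
      rw [hadd, List.filter_cons, hcx]
      simp only [Bool.false_eq_true, if_false]
      congr 1
      rw [List.filter_filter]
      refine List.filter_congr (fun y _ => ?_)
      by_cases hy : y ∈ s
      · simp [hy]
      · have hyx : y ≠ x := fun he => hy (he ▸ hx)
        simp [hy, hyx]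
    · have hadd : PySem.Set.add s x = s ++ [x] := by simp [PySem.Set.add, hx]
      have hcx : (!PySem.Set.contains s x) = true := by simp [hx]
      rw [hadd, List.filter_cons, hcx]
      simp only [if_true]
      rw [List.append_assoc, List.singleton_append]
      congr 2
      rw [List.filter_filter]
      refine List.filter_congr (fun y _ => ?_)
      by_cases hyx : y = x
      · subst hyx
        simp [hx]
      · by_cases hy : y ∈ s <;> simp [hy, hyx]

theorem pvDedupB_eq_dedup (l : List String) :
    pvDedupB l = PySem.List.dedup l := by
  have h := update_eq_append_filter_pvDedupB l []
  rw [PySem.Set.update_nil_left] at h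
  rw [PySem.List.dedup_eq_ofList, h]
  simp [PySem.Set.contains]

theorem pvItemsLin_append (l1 l2 : List (List Char)) :
    pvItemsLin (l1 ++ l2) =
      match pvItemsLin l1, pvItemsLin l2 with
      | some xs, some ys => some (xs ++ ys)
      | _, _ => none := by
  induction l1 with
  | nil =>
    simp only [List.nil_append, pvItemsLin]
    cases pvItemsLin l2 <;> rfl
  | cons p t ih =>
    simp only [List.cons_append, pvItemsLin, ih]
    cases pvExpandToken (PySem.Chars.strip p) <;>
      cases h1 : pvItemsLin t <;> cases h2 : pvItemsLin l2 <;> simp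

theorem pvExpandPartsB_aux : ∀ (n : Nat) (parts : List (List Char)), parts.length ≤ n →
    pvExpandPartsB parts = pvItemsLin parts := by
  intro n
  induction n with
  | zero =>
    intro parts h
    match parts, h with
    | [], _ => rw [pvExpandPartsB]; rfl
  | succ n ih =>
    intro parts hlen
    by_cases h : parts.length ≤ 1
    · rw [pvExpandPartsB, dif_pos h]
      match parts, h with
      | [], _ => rfl
      | [p], _ =>
        simp only [pvItemsLin]
        cases pvExpandToken (PySem.Chars.strip p) <;> simp
    · rw [pvExpandPartsB, dif_neg h,
        ih _ (by simp only [List.length_take]; omega),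
        ih _ (by simp only [List.length_drop]; omega)]
      conv_rhs => rw [← List.take_append_drop (parts.length / 2) parts, pvItemsLin_append]

theorem pvExpandPartsB_eq (parts : List (List Char)) :
    pvExpandPartsB parts = pvItemsLin parts :=
  pvExpandPartsB_aux parts.length parts le_rfl

theorem pvDedup_append (l1 l2 : List String) :
    PySem.List.dedup (l1 ++ l2) =
      PySem.List.dedup l1 ++ (PySem.List.dedup l2).filter (fun y => !((PySem.List.dedup l1).contains y)) := by
  have h1 : PySem.Set.ofList (l1 ++ l2) = PySem.Set.update (PySem.Set.ofList l1) l2 := by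
    simp [PySem.Set.ofList, PySem.Set.update, List.foldl_append]
  rw [PySem.List.dedup_eq_ofList, PySem.List.dedup_eq_ofList, PySem.List.dedup_eq_ofList,
    h1, update_eq_append_filter_pvDedupB, pvDedupB_eq_dedup, PySem.List.dedup_eq_ofList]
  simp [PySem.Set.contains]

theorem pvDedupDC_aux : ∀ (n : Nat) (items : List String), items.length ≤ n →
    pvDedupDC items = PySem.List.dedup items := by
  intro n
  induction n with
  | zero =>
    intro items h
    match items, h with
    | [], _ => rw [pvDedupDC]; simp [PySem.List.dedup_eq_ofList, PySem.Set.ofList]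
  | succ n ih =>
    intro items hlen
    by_cases h : items.length ≤ 1
    · rw [pvDedupDC, dif_pos h]
      match items, h with
      | [], _ => simp [PySem.List.dedup_eq_ofList, PySem.Set.ofList]
      | [x], _ =>
        simp [PySem.List.dedup_eq_ofList, PySem.Set.ofList, PySem.Set.add, PySem.Set.contains]
    · rw [pvDedupDC, dif_neg h]
      rw [ih _ (by simp only [List.length_take]; omega),
        ih _ (by simp only [List.length_drop]; omega)]
      conv_rhs => rw [← List.take_append_drop (items.length / 2) items, pvDedup_append]

theorem pvDedupDC_eq (items : List String) :
    pvDedupDC items = PySem.List.dedup items :=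
  pvDedupDC_aux items.length items le_rfl

-- ===== VERDICT (by name: the statement is the Claim_ definition above) =====
theorem expand_targets_spec : Claim_equal_expand_targets := by
  intro raw _ _
  unfold Spec_expand_targets expand_targets expand_targets_alt
  rw [pvLoopA_eq_partsB]
  simp only [pvExpandPartsB_eq]
  cases pvItemsLin (PySem.Chars.splitOn raw.toList [',']) <;>
    simp [PySem.Set.update_nil_left, pvDedupDC_eq, PySem.List.dedup_eq_ofList]
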